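-- pv_equiv track=rewrite | github.com/1809mayur/Array-s | Searching/flavious.py | flavius
-- ===== SOURCE A (Python) =====
-- def flavius(n):
--
--     L = list(range(1, n+1));
--     j=2
--     while j <= len(L):
--
--         L = [L[i] for i in range(len(L)) if (i+1)%j]
--
--         j+=1
--
--     if n in L:
--         return "Yes"
--     else:
--         return "No"
-- ===== SOURCE B (Python) =====
-- def flavius(n):
--     # Track only n's 1-indexed position and the list length through each pass.
--     if n < 1:
--         return "No"
--     pos = n      # n starts as the last element of [1..n]
--     length = n
--     j = 2
--     while j <= length:
--         if pos % j == 0: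
--             return "No"
--         pos -= pos // j
--         length -= length // j
--         j += 1
--     return "Yes"
-- ===== Notes on version B (the rewrite author's own statement) =====
-- stated objective: faster
-- what changed: Instead of materialising the list and rebuilding it on every sieve pass, B tracks only n's 1-indexed position and the list length, updating both in O(1) per pass (pos -= pos//j, length -= length//j) and answering No as soon as the position is divisible by the current step.
import Mathlib
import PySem

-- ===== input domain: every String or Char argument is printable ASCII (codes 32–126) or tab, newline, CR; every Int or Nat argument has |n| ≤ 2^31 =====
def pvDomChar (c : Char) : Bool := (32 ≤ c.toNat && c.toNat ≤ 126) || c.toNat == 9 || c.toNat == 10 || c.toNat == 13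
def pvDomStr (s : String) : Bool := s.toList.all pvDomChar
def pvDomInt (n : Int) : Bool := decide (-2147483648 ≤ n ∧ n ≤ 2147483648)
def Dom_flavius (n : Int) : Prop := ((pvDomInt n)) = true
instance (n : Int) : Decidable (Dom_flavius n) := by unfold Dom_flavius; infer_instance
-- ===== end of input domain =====

-- B replaces A's repeated list rebuilding by tracking only n's 1-indexed position and the
-- list length through each sieve pass (O(1) per pass instead of O(n)).

-- ===== PORT A =====
-- one sieve pass: L = [L[i] for i in range(len(L)) if (i+1)%j]
def flaviusPass (L : List Int) (j : Int) : List Int :=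
  ((PySem.List.pyRange 0 (L.length : Int) 1).filter
      (fun i => decide (PySem.Int.mod (i + 1) j ≠ 0))).filterMap
    (fun i => PySem.List.pyGet? L i)

theorem flaviusPass_length_le (L : List Int) (j : Int) :
    (flaviusPass L j).length ≤ L.length := by
  unfold flaviusPass
  calc _ ≤ ((PySem.List.pyRange 0 (L.length : Int) 1).filter
            (fun i => decide (PySem.Int.mod (i + 1) j ≠ 0))).length :=
          List.length_filterMap_le _ _
    _ ≤ (PySem.List.pyRange 0 (L.length : Int) 1).length := List.length_filter_le _ _
    _ = L.length := by rw [PySem.List.length_pyRange_one]; omega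

-- the while loop: while j <= len(L): L = pass(L, j); j += 1
def flaviusLoop (L : List Int) (j : Int) : List Int :=
  if _h : j ≤ (L.length : Int) then flaviusLoop (flaviusPass L j) (j + 1) else L
termination_by ((L.length : Int) + 2 - j).toNat
decreasing_by
  have h1 := flaviusPass_length_le L j
  omega

def flavius (n : Int) : String :=
  if n ∈ flaviusLoop (PySem.List.pyRange 1 (n + 1) 1) 2 then "Yes" else "No"

-- ===== PORT B =====
-- while j <= length: if pos % j == 0: return "No"; pos -= pos//j; length -= length//j; j += 1
-- (j only ever takes the values 2, 3, …, so it is carried as a Nat)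
def flaviusAltLoop (pos length : Int) (j : Nat) : String :=
  if _h : (j : Int) ≤ length then
    if PySem.Int.mod pos (j : Int) = 0 then "No"
    else flaviusAltLoop (pos - PySem.Int.floordiv pos (j : Int))
      (length - PySem.Int.floordiv length (j : Int)) (j + 1)
  else "Yes"
termination_by (length + 2 - (j : Int)).toNat
decreasing_by
  rcases Nat.eq_zero_or_pos j with hj | hj
  · subst hj
    simp only [Nat.cast_zero, PySem.Int.floordiv, Int.fdiv_zero] at *
    omega
  · have h0 : (0 : Int) < (j : Int) := by exact_mod_cast hj
    have hd : PySem.Int.floordiv length (j : Int) = length / (j : Int) :=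
      PySem.Int.floordiv_eq_ediv_of_pos h0
    have hlen : (0 : Int) ≤ length := le_trans (Int.natCast_nonneg j) _h
    have : (0 : Int) ≤ length / (j : Int) := Int.ediv_nonneg hlen (le_of_lt h0)
    omega

def flavius_alt (n : Int) : String :=
  if n < 1 then "No" else flaviusAltLoop n n 2

-- ===== PRECONDITION & SPEC =====
def Spec_flavius (n : Int) (out : String) : Prop := out = flavius_alt n
instance (n : Int) (out : String) : Decidable (Spec_flavius n out) := by unfold Spec_flavius; infer_instance

-- ===== CLAIM (what is proved, stated in full; the proofs are below) =====
def Claim_equal_flavius : Prop := ∀ (n : Int), Dom_flavius n → Spec_flavius n (flavius n)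

-- ===== LEMMAS AND PROOFS =====

-- the kept 0-based indices of one pass, in the Nat world
def keptIdx (len m : Nat) : List Nat :=
  (List.range len).filter (fun i => decide ((i + 1) % m ≠ 0))

theorem filterMap_eq_map_of_some {α β : Type} (f : α → Option β) (g : α → β) :
    ∀ (l : List α), (∀ x ∈ l, f x = some (g x)) → l.filterMap f = l.map g := by
  intro l
  induction l with
  | nil => intro _; rfl
  | cons a t ih =>
    intro h
    simp [h a (by simp), ih (fun x hx => h x (by simp [hx]))]

theorem flaviusPass_eq (L : List Int) (m : Nat) :
    flaviusPass L (m : Int) = (keptIdx L.length m).map (fun i => L.getD i 0) := by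
  unfold flaviusPass keptIdx
  rw [PySem.List.pyRange_zero_nat, List.filter_map, List.filterMap_map]
  have hpred : ∀ i : Nat,
      ((fun x : Int => decide (PySem.Int.mod (x + 1) (m : Int) ≠ 0)) ∘ (fun k : Nat => (k : Int)))
        i = decide ((i + 1) % m ≠ 0) := by
    intro i
    have hcast : ((i : Int) + 1) = ((i + 1 : Nat) : Int) := by push_cast; ring
    show decide (PySem.Int.mod ((i : Int) + 1) (m : Int) ≠ 0) = decide ((i + 1) % m ≠ 0)
    rw [hcast, PySem.Int.mod_natCast]
    simp only [ne_eq, decide_eq_decide]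
    omega
  rw [List.filter_congr (fun i _ => hpred i)]
  apply filterMap_eq_map_of_some
  intro i hi
  have hilt : i < L.length := by
    have := List.mem_filter.mp hi
    simpa using List.mem_range.mp this.1
  simp [Function.comp, PySem.List.pyGet?_natCast, List.getD_eq_getElem?_getD,
    List.getElem?_eq_getElem hilt]

theorem countP_kept (m : Nat) : ∀ i : Nat,
    (List.range i).countP (fun k => decide ((k + 1) % m ≠ 0)) = i - i / m := by
  intro i
  induction i with
  | zero => simp
  | succ k ih =>
    rw [List.range_succ, List.countP_append, ih, Nat.succ_div]
    have hd := Nat.div_le_self k m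
    have hiff : ((k + 1) % m ≠ 0) ↔ ¬ m ∣ (k + 1) := by rw [Nat.dvd_iff_mod_eq_zero]
    by_cases h : m ∣ (k + 1)
    · simp [hiff, h]
    · simp [hiff, h]
      omega

theorem length_keptIdx (len m : Nat) : (keptIdx len m).length = len - len / m := by
  unfold keptIdx
  rw [← List.countP_eq_length_filter]
  exact countP_kept m len

theorem nodup_keptIdx (len m : Nat) : (keptIdx len m).Nodup :=
  (List.nodup_range).filter _

theorem filter_range_getElem? (P : Nat → Bool) (len i : Nat) (hi : i < len) (hP : P i = true) :
    ((List.range len).filter P)[(List.range i).countP P]? = some i := by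
  have hsplit : len = (i + 1) + (len - i - 1) := by omega
  rw [hsplit, List.range_add, List.filter_append, List.range_succ, List.filter_append]
  have hfi : List.filter P [i] = [i] := by simp [hP]
  rw [hfi, List.append_assoc]
  have hcnt : ((List.range i).filter P).length = (List.range i).countP P :=
    List.countP_eq_length_filter.symm
  rw [← hcnt]
  rw [List.getElem?_append_right (le_refl _)]
  simp

theorem keptIdx_getElem (len m i : Nat) (hi : i < len) (hP : (i + 1) % m ≠ 0) :
    (keptIdx len m)[i - i / m]? = some i := by
  unfold keptIdx
  rw [← countP_kept m i]
  exact filter_range_getElem? _ len i hi (by simpa using hP)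

-- (p-1)/m = p/m when m does not divide p
theorem pred_div_eq (m p : Nat) (h : p % m ≠ 0) : (p - 1) / m = p / m := by
  rcases Nat.eq_zero_or_pos m with hm | hm
  · subst hm; simp
  · have hp : 0 < p := by
      rcases Nat.eq_zero_or_pos p with h0 | h0
      · subst h0; simp at h
      · exact h0
    have hdm := Nat.div_add_mod p m
    have hr : 1 ≤ p % m := by omega
    have h2 : p - 1 = m * (p / m) + (p % m - 1) := by omega
    have h3 : (p % m - 1) / m = 0 := Nat.div_eq_of_lt (by have := Nat.mod_lt p hm; omega)
    rw [h2, Nat.mul_add_div hm, h3]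
    exact Nat.add_zero _

-- x ↦ x - x/m is monotone
theorem sub_div_mono (m : Nat) : ∀ x y : Nat, x ≤ y → x - x / m ≤ y - y / m := by
  intro x y h
  induction y with
  | zero =>
    have hx : x = 0 := Nat.le_zero.mp h
    subst hx; exact le_refl _
  | succ k ih =>
    by_cases hxk : x ≤ k
    · have h1 := ih hxk
      have h2 : (k + 1) / m ≤ k / m + 1 := by
        rw [Nat.succ_div]; split <;> omega
      have h3 : k / m ≤ (k + 1) / m := Nat.div_le_div_right (by omega)
      have h4 := Nat.div_le_self k m
      have h5 := Nat.div_le_self x m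
      omega
    · have hx : x = k + 1 := by omega
      subst hx; exact le_refl _

-- loopA never introduces new elements
theorem mem_flaviusPass (L : List Int) (j : Int) (x : Int) (h : x ∈ flaviusPass L j) : x ∈ L := by
  unfold flaviusPass at h
  obtain ⟨i, _, hg⟩ := List.mem_filterMap.mp h
  exact PySem.List.mem_of_pyGet?_eq_some L hg

theorem mem_flaviusLoop (L : List Int) (j : Int) (x : Int) (h : x ∈ flaviusLoop L j) : x ∈ L := by
  induction L, j using flaviusLoop.induct with
  | case1 L j hle ih =>
    rw [flaviusLoop, dif_pos hle] at h
    exact mem_flaviusPass L j x (ih h)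
  | case2 L j hle =>
    rw [flaviusLoop, dif_neg hle] at h
    exact h

-- the main invariant-preservation induction
theorem loop_agree (nv : Int) : ∀ (f : Nat) (L : List Int) (p : Int) (m : Nat),
    L.length + 2 - m ≤ f → 2 ≤ m → 1 ≤ p → p ≤ (L.length : Int) →
    (∀ i : Nat, L[i]? = some nv ↔ i = p.toNat - 1) →
    (if nv ∈ flaviusLoop L (m : Int) then "Yes" else "No") = flaviusAltLoop p (L.length : Int) m := by
  intro f
  induction f with
  | zero =>
    intro L p m hf hm hp hpl hinv
    have hgt : ¬ ((m : Int) ≤ (L.length : Int)) := by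
      intro hc
      have : m ≤ L.length := by exact_mod_cast hc
      omega
    rw [flaviusLoop, dif_neg hgt, flaviusAltLoop, dif_neg hgt]
    have : nv ∈ L := by
      have := (hinv (p.toNat - 1)).mpr rfl
      exact List.mem_of_getElem? this
    rw [if_pos this]
  | succ f ih =>
    intro L p m hf hm hp hpl hinv
    by_cases hle : (m : Int) ≤ (L.length : Int)
    case neg =>
      rw [flaviusLoop, dif_neg hle, flaviusAltLoop, dif_neg hle]
      have : nv ∈ L := by
        have := (hinv (p.toNat - 1)).mpr rfl
        exact List.mem_of_getElem? this
      rw [if_pos this]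
    case pos =>
      have hmlen : m ≤ L.length := by exact_mod_cast hle
      set pnat := p.toNat with hpnat
      have hpcast : p = (pnat : Int) := by omega
      have hp1 : 1 ≤ pnat := by omega
      have hplen : pnat ≤ L.length := by
        rw [hpcast] at hpl; exact_mod_cast hpl
      have hpmod : PySem.Int.mod p (m : Int) = ((pnat % m : Nat) : Int) := by
        rw [hpcast]; exact PySem.Int.mod_natCast pnat m
      rw [flaviusLoop, dif_pos hle, flaviusAltLoop, dif_pos hle]
      -- value at the old position
      have hval : L[pnat - 1]? = some nv := (hinv (pnat - 1)).mpr rfl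
      have hvlt : pnat - 1 < L.length := by
        by_contra hc
        rw [List.getElem?_eq_none (by omega)] at hval
        simp at hval
      by_cases hdiv : pnat % m = 0
      case pos =>
        -- B returns "No"; n is removed by this pass and never comes back
        have hcond : PySem.Int.mod p (m : Int) = 0 := by rw [hpmod, hdiv]; rfl
        rw [if_pos hcond]
        have hnot : nv ∉ flaviusPass L (m : Int) := by
          rw [flaviusPass_eq]
          intro hc
          obtain ⟨i, hik, hgi⟩ := List.mem_map.mp hc
          have hikm := List.mem_filter.mp hik
          have hilt : i < L.length := by simpa using List.mem_range.mp hikm.1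
          have hkeep : (i + 1) % m ≠ 0 := by simpa using hikm.2
          have : L[i]? = some nv := by
            rw [List.getElem?_eq_getElem hilt]
            rw [List.getD_eq_getElem?_getD, List.getElem?_eq_getElem hilt] at hgi
            simp only [Option.getD_some] at hgi
            rw [hgi]
          have hieq : i = pnat - 1 := (hinv i).mp this
          rw [hieq] at hkeep
          have : pnat - 1 + 1 = pnat := by omega
          rw [this] at hkeep
          exact hkeep hdiv
        have : nv ∉ flaviusLoop (flaviusPass L (m : Int)) ((m : Int) + 1) := by
          intro hc; exact hnot (mem_flaviusLoop _ _ _ hc)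
        rw [if_neg this]
      case neg =>
        have hcond : ¬ PySem.Int.mod p (m : Int) = 0 := by
          rw [hpmod]; intro hc; exact hdiv (by exact_mod_cast hc)
        rw [if_neg hcond]
        -- set up the recursive call
        set len := L.length with hlen
        have hlenpos : 1 ≤ len := by omega
        have hL' : (flaviusPass L (m : Int)).length = len - len / m := by
          rw [flaviusPass_eq, List.length_map, length_keptIdx]
        have hdm : 0 < m := by omega
        have hdivlen : 1 ≤ len / m := (Nat.one_le_div_iff hdm).mpr hmlen
        have hdivp : pnat / m < pnat := Nat.div_lt_self (by omega) (by omega)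
        -- the new 1-based position as a Nat
        have hfloorp : PySem.Int.floordiv p (m : Int) = ((pnat / m : Nat) : Int) := by
          rw [hpcast]; exact PySem.Int.floordiv_natCast pnat m
        have hfloorl : PySem.Int.floordiv (len : Int) (m : Int) = ((len / m : Nat) : Int) :=
          PySem.Int.floordiv_natCast len m
        have hp' : p - PySem.Int.floordiv p (m : Int) = ((pnat - pnat / m : Nat) : Int) := by
          rw [hfloorp, hpcast]; push_cast [Nat.div_le_self]; omega
        have hl' : (len : Int) - PySem.Int.floordiv (len : Int) (m : Int)
            = (((len - len / m : Nat)) : Int) := by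
          rw [hfloorl]; push_cast [Nat.div_le_self]; omega
        rw [hp']
        rw [hl']
        rw [← hL']
        have hrank : pnat - pnat / m - 1 = (pnat - 1) - (pnat - 1) / m := by
          rw [pred_div_eq m pnat hdiv]
          omega
        have hinv' : ∀ i : Nat, (flaviusPass L (m : Int))[i]? = some nv ↔
            i = ((pnat - pnat / m : Nat) : Int).toNat - 1 := by
          have htoNat : ((pnat - pnat / m : Nat) : Int).toNat = pnat - pnat / m := by omega
          simp only [htoNat]
          intro i
          rw [flaviusPass_eq]
          constructor
          · intro hget
            rw [List.getElem?_map] at hget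
            obtain ⟨k, hk, hgk⟩ : ∃ k, (keptIdx len m)[i]? = some k ∧ L.getD k 0 = nv := by
              cases hk : (keptIdx len m)[i]? with
              | none => rw [hk] at hget; simp at hget
              | some k => rw [hk] at hget; exact ⟨k, rfl, by simpa using hget⟩
            have hkmem : k ∈ keptIdx len m := by
              have := List.getElem?_eq_some_iff.mp hk
              obtain ⟨hlt, hke⟩ := this
              rw [← hke]; exact List.getElem_mem hlt
            have hkf := List.mem_filter.mp hkmem
            have hklt : k < len := by simpa using List.mem_range.mp hkf.1
            have hkval : L[k]? = some nv := by
              rw [List.getElem?_eq_getElem hklt]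
              rw [List.getD_eq_getElem?_getD, List.getElem?_eq_getElem hklt] at hgk
              simp only [Option.getD_some] at hgk
              rw [hgk]
            have hkeq : k = pnat - 1 := (hinv k).mp hkval
            subst hkeq
            have hrk : (keptIdx len m)[(pnat - 1) - (pnat - 1) / m]? = some (pnat - 1) := by
              apply keptIdx_getElem len m (pnat - 1) (by omega)
              have : pnat - 1 + 1 = pnat := by omega
              rw [this]; exact hdiv
            have hilen : i < (keptIdx len m).length := (List.getElem?_eq_some_iff.mp hk).1
            have := List.getElem?_inj hilen (nodup_keptIdx len m) (hk.trans hrk.symm)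
            omega
          · intro hieq
            subst hieq
            rw [List.getElem?_map]
            have : pnat - pnat / m - 1 = (pnat - 1) - (pnat - 1) / m := hrank
            rw [this]
            have hrk : (keptIdx len m)[(pnat - 1) - (pnat - 1) / m]? = some (pnat - 1) := by
              apply keptIdx_getElem len m (pnat - 1) (by omega)
              have h2 : pnat - 1 + 1 = pnat := by omega
              rw [h2]; exact hdiv
            rw [hrk]
            simp only [Option.map_some]
            rw [List.getD_eq_getElem?_getD, hval]
            rfl
        have hmono := sub_div_mono m pnat len hplen
        have happ := ih (flaviusPass L (m : Int)) ((pnat - pnat / m : Nat) : Int) (m + 1)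
          (by rw [hL']; omega) (by omega)
          (by have : 1 ≤ pnat - pnat / m := by omega
              exact_mod_cast this)
          (by rw [hL']; exact_mod_cast hmono)
          hinv'
        have hcast : ((m : Int) + 1) = ((m + 1 : Nat) : Int) := by push_cast; ring
        rw [hcast]
        exact happ
-- final assembly
theorem flavius_eq (n : Int) : flavius n = flavius_alt n := by
  unfold flavius flavius_alt
  by_cases hn : n < 1
  case pos =>
    rw [if_pos hn]
    have h0 : PySem.List.pyRange 1 (n + 1) 1 = [] := PySem.List.pyRange_one_eq_nil (by omega)
    rw [h0]
    rw [flaviusLoop]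
    norm_num
  case neg =>
    rw [if_neg hn]
    set N := n.toNat with hN
    have hn1 : 1 ≤ n := by omega
    have hlen : (PySem.List.pyRange 1 (n + 1) 1).length = N := by
      rw [PySem.List.length_pyRange_one]; omega
    have hinv : ∀ i : Nat, (PySem.List.pyRange 1 (n + 1) 1)[i]? = some n ↔ i = n.toNat - 1 := by
      intro i
      by_cases hi : i < N
      · rw [List.getElem?_eq_getElem (by omega)]
        rw [PySem.List.getElem_pyRange_one]
        constructor
        · intro h
          have : 1 + (i : Int) = n := by simpa using h
          omega
        · intro h
          subst h
          have : 1 + ((n.toNat - 1 : Nat) : Int) = n := by omega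
          rw [this]
      · rw [List.getElem?_eq_none (by omega)]
        constructor
        · intro h; simp at h
        · intro h; omega
    have := loop_agree n (N + 2) (PySem.List.pyRange 1 (n + 1) 1) n 2
      (by omega) (le_refl 2) hn1 (by rw [hlen]; omega) hinv
    rw [hlen] at this
    have hNn : ((N : Nat) : Int) = n := by omega
    rw [hNn] at this
    exact_mod_cast this

-- ===== VERDICT (by name: the statement is the Claim_ definition above) =====
theorem flavius_spec : Claim_equal_flavius := by
  intro n _
  unfold Spec_flavius
  exact flavius_eq n
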